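-- pv_equiv track=rewrite | github.com/t3moses/Crews | pythonProject/strings.py | csv_safe
-- ===== SOURCE A (Python) =====
-- def csv_safe( string ):
--
--     safe_string = ""
--     for char in string:
--         if char == ",":
--             safe_string += "&#44;"
--         elif ord(char) == 10: # new line.
--             safe_string += "&#10;"
--         else:
--             safe_string += char
--     return safe_string
-- ===== SOURCE B (Python) =====
-- def csv_safe(string):
--     return string.replace(",", "&#44;").replace("\n", "&#10;")
-- ===== Notes on version B (the rewrite author's own statement) =====
-- stated objective: faster
-- what changed: Replaced the per-character accumulator loop with two chained str.replace passes (one whole-string scan for ',' then one for '\n').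
import Mathlib
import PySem

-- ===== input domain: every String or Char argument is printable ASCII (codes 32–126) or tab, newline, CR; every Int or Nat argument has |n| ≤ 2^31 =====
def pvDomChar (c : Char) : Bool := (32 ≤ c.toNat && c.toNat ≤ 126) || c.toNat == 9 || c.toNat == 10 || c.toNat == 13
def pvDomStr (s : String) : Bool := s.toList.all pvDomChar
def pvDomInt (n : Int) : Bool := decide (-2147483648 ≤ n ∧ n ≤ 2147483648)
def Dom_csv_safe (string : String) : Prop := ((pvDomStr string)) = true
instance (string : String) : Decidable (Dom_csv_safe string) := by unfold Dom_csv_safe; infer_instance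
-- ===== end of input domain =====

-- B replaces A's per-character accumulator loop with two chained str.replace passes (idiomatic).


-- ===== PORT A =====
-- per-character loop, accumulator safe_string (List Char), same branch order as A
def csv_safe (string : String) : String :=
  String.ofList
    (string.toList.foldl
      (fun acc c =>
        if c == ',' then acc ++ "&#44;".toList
        else if c.toNat == 10 then acc ++ "&#10;".toList
        else acc ++ [c])
      [])

-- ===== PORT B =====
-- two chained str.replace passes, as in Source B
def csv_safe_alt (string : String) : String :=
  PySem.Str.replace (PySem.Str.replace string "," "&#44;") "\n" "&#10;"

-- ===== PRECONDITION & SPEC =====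
def Spec_csv_safe (string : String) (out : String) : Prop := out = csv_safe_alt string
instance (string : String) (out : String) : Decidable (Spec_csv_safe string out) := by unfold Spec_csv_safe; infer_instance

-- ===== CLAIM (what is proved, stated in full; the proofs are below) =====
def Claim_equal_csv_safe : Prop := ∀ (string : String), Dom_csv_safe string → Spec_csv_safe string (csv_safe string)

-- ===== LEMMAS AND PROOFS =====

-- replace with a single-character pattern is a per-character flatMap
theorem replace_go_single (a : Char) (new : List Char) :
    ∀ (l acc : List Char) (fuel : Nat), l.length ≤ fuel →
      PySem.Chars.replace.go [a] new fuel l acc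
        = acc.reverse ++ l.flatMap (fun c => if c == a then new else [c]) := by
  intro l
  induction l with
  | nil =>
      intro acc fuel _
      cases fuel <;> simp [PySem.Chars.replace.go]
  | cons c t ih =>
      intro acc fuel hf
      cases fuel with
      | zero => simp at hf
      | succ fuel =>
        by_cases h : c = a
        · subst h
          have hpre : List.isPrefixOf [c] (c :: t) = true := by
            simp [List.isPrefixOf]
          simp only [PySem.Chars.replace.go, hpre, if_pos]
          show PySem.Chars.replace.go [c] new fuel t (new.reverse ++ acc) = _
          rw [ih _ fuel (by simpa using Nat.le_of_succ_le_succ hf)]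
          simp
        · have hpre : List.isPrefixOf [a] (c :: t) = false := by
            simp [List.isPrefixOf]
            intro hh; exact h hh.symm
          simp only [PySem.Chars.replace.go, hpre, Bool.false_eq_true, if_false]
          rw [ih _ fuel (by simpa using Nat.le_of_succ_le_succ hf)]
          simp [h]

theorem replace_single (a : Char) (new l : List Char) :
    PySem.Chars.replace l [a] new = l.flatMap (fun c => if c == a then new else [c]) := by
  simp [PySem.Chars.replace, replace_go_single a new l [] l.length (le_refl _)]

theorem csv_safe_spec_aux (l : List Char) :
    l.foldl
      (fun acc c =>
        if c == ',' then acc ++ "&#44;".toList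
        else if c.toNat == 10 then acc ++ "&#10;".toList
        else acc ++ [c]) []
    = (l.flatMap (fun c => if c == ',' then "&#44;".toList else [c])).flatMap
        (fun c => if c == '\n' then "&#10;".toList else [c]) := by
  have hfold : ∀ (acc : List Char),
      l.foldl
        (fun acc c =>
          if c == ',' then acc ++ "&#44;".toList
          else if c.toNat == 10 then acc ++ "&#10;".toList
          else acc ++ [c]) acc
      = acc ++ l.flatMap (fun c =>
          if c == ',' then "&#44;".toList
          else if c.toNat == 10 then "&#10;".toList
          else [c]) := by
    induction l with
    | nil => simp
    | cons c t ih => intro acc; simp only [List.foldl_cons, List.flatMap_cons, ih]; split_ifs <;> simp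
  rw [hfold, List.flatMap_assoc]
  simp only [List.nil_append]
  apply List.flatMap_congr   -- pointwise equality of the per-character expansions
  intro c _
  by_cases h1 : c = ','
  · subst h1; decide
  · by_cases h2 : c = '\n'
    · subst h2; decide
    · have h10 : (c.toNat == 10) = false := by
        simp only [beq_eq_false_iff_ne]
        intro hh
        apply h2
        have := Char.ofNat_toNat c
        rw [hh] at this
        exact this.symm
      simp [h1, h2, h10]

-- ===== VERDICT (by name: the statement is the Claim_ definition above) =====
theorem csv_safe_spec : Claim_equal_csv_safe := by
  intro s _
  unfold Spec_csv_safe csv_safe csv_safe_alt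
  simp only [PySem.Str.replace, String.toList_ofList]
  rw [show (",".toList) = [','] from rfl, show ("\n".toList) = ['\n'] from rfl,
      replace_single, replace_single, csv_safe_spec_aux]
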